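-- pv_equiv track=rewrite | github.com/karrlopezz/dsc20_HW | hw06.py | outsmart_dragon
-- ===== SOURCE A (Python) =====
-- def corrupt_password(input, to_insert):
--     """
--     takes in a single string, a character to_insert and
--     returns a corrupted new string where each character
--     is followed by a to_insert character.
--     --
--     Parameters:
--     input: single string
--     to_insert: character
--     --
--     Returns:
--     corrupted new string where each character is followed by
--      a to_insert character
--
--     >>> corrupt_password('dragon', '#')
--     'd#r#a#g#o#n#'
--     >>> corrupt_password('', '@')
--     ''
--     >>> corrupt_password('I can help', '-')
--     'I- -c-a-n- -h-e-l-p-'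
--
--     # Add AT LEAST 3 doctests below, DO NOT delete this line
--
--     >>> corrupt_password('Karina loves dragons', '*')
--     'K*a*r*i*n*a* *l*o*v*e*s* *d*r*a*g*o*n*s*'
--
--     >>> corrupt_password('I am the dragon', '!')
--     'I! !a!m! !t!h!e! !d!r!a!g!o!n!'
--
--     >>> corrupt_password('Karina', ' ')
--     'K a r i n a '
--     """
--     if input == '':
--         return ''
--     first = input[0]
--     """ first means first char in remaining string"""
--     rest = input[1:]
--     return first + to_insert + corrupt_password(rest, to_insert)
--
-- def outsmart_dragon(lst, password, to_insert):
--     """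
--     corrupts all strings except ones that match the password
--     --
--     Parameters:
--     lst: list of strings
--     password: password to look for (string)
--     to_insert: element to insert
--     --
--     Returns:
--     corrupts string that is not the password where each
--      character is followed by a to_insert character
--
--     >>> outsmart_dragon(['dragon'], 'dragon','#')
--     ['dragon']
--     >>> outsmart_dragon([], 'dragon','@')
--     []
--     >>> outsmart_dragon(['help me', 'dragon'], 'dragon','-')
--     ['h-e-l-p- -m-e-', 'dragon']
--     >>> outsmart_dragon(['help me', 'dear dragon'], 'dragon','-')
--     ['h-e-l-p- -m-e-', 'd-e-a-r- -d-r-a-g-o-n-']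
--     >>> outsmart_dragon(['DrAgOn', 'Dragon'], 'dragon','-')
--     ['D-r-A-g-O-n-', 'D-r-a-g-o-n-']
--
--     # Add AT LEAST 3 doctests below, DO NOT delete this line
--
--     >>> outsmart_dragon(['Karina', 'likes dragons'], 'dragon', '*')
--     ['K*a*r*i*n*a*', 'l*i*k*e*s* *d*r*a*g*o*n*s*']
--
--     >>> outsmart_dragon(['Karina loves dragons', 'Dragon'],\
--  'dragon', '$')
--     ['K$a$r$i$n$a$ $l$o$v$e$s$ $d$r$a$g$o$n$s$', 'D$r$a$g$o$n$']
--
--     >>> outsmart_dragon(['dragon', 'DRAGON', 'karina',\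
--  'DRaGoN'], 'karina', '-')
--     ['d-r-a-g-o-n-', 'D-R-A-G-O-N-', 'karina', 'D-R-a-G-o-N-']
--     """
--     if len(lst) == 0:
--         return []
--     first = lst[0]
--     """ first means first in lst """
--     rest = outsmart_dragon(lst[1:], password, to_insert)
--     if first == password:
--         return [first] + rest
--     else:
--         return [corrupt_password(first, to_insert)] + rest
-- ===== SOURCE B (Python) =====
-- def outsmart_dragon(lst, password, to_insert):
--     out = []
--     for s in lst:
--         if s == password:
--             out.append(s)
--         else:
--             out.append(''.join(c + to_insert for c in s))
--     return out
-- ===== Notes on version B (the rewrite author's own statement) =====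
-- stated objective: simpler
-- what changed: Replaced both recursions (over the list and over each string) with a single iterative loop accumulating results, building each corrupted string in one pass with str.join.
import Mathlib
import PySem

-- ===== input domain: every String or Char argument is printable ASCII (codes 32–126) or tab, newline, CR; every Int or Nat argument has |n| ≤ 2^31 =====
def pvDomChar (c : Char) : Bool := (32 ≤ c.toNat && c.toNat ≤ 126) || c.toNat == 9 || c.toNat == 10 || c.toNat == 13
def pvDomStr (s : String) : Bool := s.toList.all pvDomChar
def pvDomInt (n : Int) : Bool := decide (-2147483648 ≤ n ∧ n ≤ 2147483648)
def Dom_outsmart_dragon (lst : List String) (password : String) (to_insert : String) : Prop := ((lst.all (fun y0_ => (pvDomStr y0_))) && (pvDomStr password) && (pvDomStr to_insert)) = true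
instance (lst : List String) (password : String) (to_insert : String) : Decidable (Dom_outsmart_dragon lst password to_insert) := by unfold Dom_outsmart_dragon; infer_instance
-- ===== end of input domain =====

-- B replaces both recursions with one iterative accumulation loop, building each corrupted string in one pass; objective: simpler.
-- ===== PORT A =====
-- corrupt_password, recursing on the string's characters (input[0] / input[1:])
def corrupt_password (input : List Char) (to_insert : String) : String :=
  match input with
  | [] => ""
  | first :: rest => String.singleton first ++ to_insert ++ corrupt_password rest to_insert

def outsmart_dragon (lst : List String) (password : String) (to_insert : String) : List String :=
  match lst with
  | [] => []
  | first :: tail =>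
    let rest := outsmart_dragon tail password to_insert
    if first == password then first :: rest
    else corrupt_password first.toList to_insert :: rest

-- ===== PORT B =====
def outsmart_dragon_alt (lst : List String) (password : String) (to_insert : String) : List String :=
  lst.foldl (fun out s =>
    out ++ [if s == password then s
            else String.join (s.toList.map (fun c => String.singleton c ++ to_insert))]) []

-- ===== PRECONDITION & SPEC =====
def Spec_outsmart_dragon (lst : List String) (password : String) (to_insert : String) (out : List String) : Prop := out = outsmart_dragon_alt lst password to_insert
instance (lst : List String) (password : String) (to_insert : String) (out : List String) : Decidable (Spec_outsmart_dragon lst password to_insert out) := by unfold Spec_outsmart_dragon; infer_instance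

-- ===== CLAIM (what is proved, stated in full; the proofs are below) =====
def Claim_equal_outsmart_dragon : Prop := ∀ (lst : List String) (password : String) (to_insert : String), Dom_outsmart_dragon lst password to_insert → Spec_outsmart_dragon lst password to_insert (outsmart_dragon lst password to_insert)

-- ===== LEMMAS AND PROOFS =====

-- ===== VERDICT (by name: the statement is the Claim_ definition above) =====
lemma str_foldl_append (l : List String) (init : String) :
    l.foldl (fun r s => r ++ s) init = init ++ l.foldl (fun r s => r ++ s) "" := by
  induction l generalizing init with
  | nil => simp
  | cons s tail ih =>
    simp only [List.foldl_cons]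
    rw [ih, ih (("":String) ++ s)]
    simp [String.append_assoc]

lemma corrupt_password_join (cs : List Char) (t : String) :
    corrupt_password cs t = String.join (cs.map (fun c => String.singleton c ++ t)) := by
  induction cs with
  | nil => rfl
  | cons c cs ih =>
    simp only [corrupt_password, String.join, List.map_cons, List.foldl_cons, ih]
    rw [str_foldl_append _ (("":String) ++ (String.singleton c ++ t))]
    simp [String.append_assoc]

lemma alt_foldl_acc (lst : List String) (password to_insert : String) (acc : List String) :
    lst.foldl (fun out s =>
      out ++ [if s == password then s
              else String.join (s.toList.map (fun c => String.singleton c ++ to_insert))]) acc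
    = acc ++ outsmart_dragon lst password to_insert := by
  induction lst generalizing acc with
  | nil => simp [outsmart_dragon]
  | cons s tail ih =>
    simp only [List.foldl_cons, outsmart_dragon, ih]
    by_cases h : s == password <;> simp [h, corrupt_password_join]

theorem outsmart_dragon_spec : Claim_equal_outsmart_dragon := by
  intro lst password to_insert _
  unfold Spec_outsmart_dragon outsmart_dragon_alt
  rw [alt_foldl_acc]
  simp
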